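-- pv_equiv track=rewrite | github.com/drsezzer/CodingChallenge | personas/BigBang-Penny.py | compute_transitive_dependents
-- ===== SOURCE A (Python) =====
-- from collections import defaultdict, deque
--
-- def compute_transitive_dependents(dependencies, reverse_dependencies):
--     all_packages = set(dependencies.keys()).union(set(reverse_dependencies.keys()))
--     transitive_count = {}
--     for package in all_packages:
--         visited = set()
--         queue = deque([package])
--         while queue:
--             current = queue.popleft()
--             for dependent in reverse_dependencies[current]:
--                 if dependent not in visited:
--                     visited.add(dependent)
--                     queue.append(dependent)
--         # Subtract one to not count the package itself
--         transitive_count[package] = len(visited) - 1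
--     return transitive_count
-- ===== SOURCE B (Python) =====
-- def compute_transitive_dependents(dependencies, reverse_dependencies):
--     transitive_count = {}
--     for package in set(dependencies.keys()).union(set(reverse_dependencies.keys())):
--         visited = set(reverse_dependencies[package])
--         frontier = visited
--         while frontier:
--             frontier = {d for v in frontier for d in reverse_dependencies[v]} - visited
--             visited |= frontier
--         transitive_count[package] = len(visited) - 1
--     return transitive_count
-- ===== Notes on version B (the rewrite author's own statement) =====
-- stated objective: alternative
-- what changed: Replaces A's per-package element-at-a-time BFS (deque worklist with a per-dependent not-in-visited test feeding the queue) by a level-synchronous set saturation: each round expands the whole frontier with one set comprehension, subtracts visited, and unions the new level in; the reachable set and the len(visited)-1 count are identical.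
import Mathlib
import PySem

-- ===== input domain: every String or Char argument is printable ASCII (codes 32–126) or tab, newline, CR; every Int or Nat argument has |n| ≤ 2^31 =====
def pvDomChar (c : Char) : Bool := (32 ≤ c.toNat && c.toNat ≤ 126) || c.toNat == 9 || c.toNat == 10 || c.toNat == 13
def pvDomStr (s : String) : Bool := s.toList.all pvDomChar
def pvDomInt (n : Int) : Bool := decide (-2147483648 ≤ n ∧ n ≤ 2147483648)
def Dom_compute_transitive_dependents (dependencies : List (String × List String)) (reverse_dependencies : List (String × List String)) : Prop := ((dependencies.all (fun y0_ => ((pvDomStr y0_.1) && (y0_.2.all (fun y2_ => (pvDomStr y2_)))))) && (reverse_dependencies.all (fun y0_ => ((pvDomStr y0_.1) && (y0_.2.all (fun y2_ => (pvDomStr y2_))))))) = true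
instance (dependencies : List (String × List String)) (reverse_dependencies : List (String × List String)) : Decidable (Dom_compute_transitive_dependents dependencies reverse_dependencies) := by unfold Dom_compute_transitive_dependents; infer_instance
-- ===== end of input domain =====

-- B replaces A's per-package element-at-a-time deque BFS by a level-synchronous set
-- saturation: each round expands the whole frontier at once with a set comprehension,
-- subtracts visited, and unions the result in (alternative decomposition; same values).

-- ===== PORT A =====
-- BFS worklist loop of A: 'while queue: current = queue.popleft(); for dependent in
-- reverse_dependencies[current]: ...'.  The fuel argument is a totality guard only; the
-- fuel passed by the port is proved large enough that the queue always drains first.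
def pvBfsA (rev : PySem.Dict String (List String)) : Nat → List String → PySem.Set String → PySem.Set String
  | 0, _, visited => visited
  | _ + 1, [], visited => visited
  | fuel + 1, current :: queue, visited =>
    match rev.get? current with
    | none => visited   -- Python raises KeyError here; such inputs are excluded by Pre_
    | some deps =>
      let st := deps.foldl
        (fun (st : PySem.Set String × List String) dependent =>
          if PySem.Set.contains st.1 dependent then st
          else (PySem.Set.add st.1 dependent, st.2 ++ [dependent]))
        (visited, queue)
      pvBfsA rev fuel st.2 st.1

def compute_transitive_dependents (dependencies : List (String × List String)) (reverse_dependencies : List (String × List String)) : List (String × Int) :=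
  let deps := PySem.Dict.mk dependencies
  let revd := PySem.Dict.mk reverse_dependencies
  let all_packages : PySem.Set String :=
    PySem.Set.union (PySem.Set.ofList (PySem.Dict.keys deps)) (PySem.Set.ofList (PySem.Dict.keys revd))
  let fuel := 2 + 2 * (PySem.Dict.values revd).flatten.length
  let transitive_count : PySem.Dict String Int :=
    all_packages.foldl
      (fun d package =>
        let visited := pvBfsA revd fuel [package] PySem.Set.empty
        d.insert package ((PySem.Set.len visited : Int) - 1))
      PySem.Dict.empty
  transitive_count.items

-- ===== PORT B =====
-- 'reverse_dependencies[v]' seen through the dict; the default [] is never taken on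
-- inputs admitted by Pre_ (a missing key is Python's KeyError, excluded there).
def pvF (rev : PySem.Dict String (List String)) (v : String) : List String :=
  (rev.get? v).getD []

-- the set comprehension '{d for v in frontier for d in reverse_dependencies[v]}'
def pvSucc (rev : PySem.Dict String (List String)) (frontier : PySem.Set String) : PySem.Set String :=
  frontier.foldl (fun s v => PySem.Set.update s (pvF rev v)) PySem.Set.empty

-- the saturation loop of B: 'while frontier: frontier = {…} - visited; visited |= frontier'.
-- The fuel argument is a totality guard only (visited grows every round); the fuel the
-- port passes is proved large enough.
def pvSatB (rev : PySem.Dict String (List String)) : Nat → PySem.Set String → PySem.Set String → PySem.Set String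
  | 0, visited, _ => visited
  | fuel + 1, visited, frontier =>
    if frontier = [] then visited
    else
      let frontier' := PySem.Set.diff (pvSucc rev frontier) visited
      pvSatB rev fuel (PySem.Set.union visited frontier') frontier'

def compute_transitive_dependents_alt (dependencies : List (String × List String)) (reverse_dependencies : List (String × List String)) : List (String × Int) :=
  let revd := PySem.Dict.mk reverse_dependencies
  let fuel := 2 + (PySem.Dict.values revd).flatten.length
  (PySem.Set.union (PySem.Set.ofList (PySem.Dict.keys (PySem.Dict.mk dependencies)))
      (PySem.Set.ofList (PySem.Dict.keys revd))).foldl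
    (fun d package =>
      let visited0 : PySem.Set String := PySem.Set.ofList (pvF revd package)
      d.insert package ((PySem.Set.len (pvSatB revd fuel visited0 visited0) : Int) - 1))
    (PySem.Dict.empty : PySem.Dict String Int)
  |>.items

-- ===== PRECONDITION & SPEC =====
-- Pre_ excludes exactly the inputs on which A raises KeyError: every key of `dependencies`
-- and every name listed in a value of `reverse_dependencies` must itself be a key of
-- `reverse_dependencies` (A looks all of them up with a bare [] index).
def Pre_compute_transitive_dependents (dependencies : List (String × List String)) (reverse_dependencies : List (String × List String)) : Prop :=
  (∀ p ∈ dependencies, (PySem.Dict.mk reverse_dependencies).contains p.1 = true) ∧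
  (∀ p ∈ reverse_dependencies, ∀ v ∈ p.2, (PySem.Dict.mk reverse_dependencies).contains v = true)
instance (dependencies : List (String × List String)) (reverse_dependencies : List (String × List String)) : Decidable (Pre_compute_transitive_dependents dependencies reverse_dependencies) := by unfold Pre_compute_transitive_dependents; infer_instance

def pvWitness_compute_transitive_dependents : (List (String × List String)) × (List (String × List String)) :=
  ([("a", [])], [("a", ["b"]), ("b", ["a"]), ("c", [])])

def Spec_compute_transitive_dependents (dependencies : List (String × List String)) (reverse_dependencies : List (String × List String)) (out : List (String × Int)) : Prop := out = compute_transitive_dependents_alt dependencies reverse_dependencies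
instance (dependencies : List (String × List String)) (reverse_dependencies : List (String × List String)) (out : List (String × Int)) : Decidable (Spec_compute_transitive_dependents dependencies reverse_dependencies out) := by unfold Spec_compute_transitive_dependents; infer_instance

-- ===== CLAIM (what is proved, stated in full; the proofs are below) =====
def Claim_equal_compute_transitive_dependents : Prop := ∀ (dependencies : List (String × List String)) (reverse_dependencies : List (String × List String)), Dom_compute_transitive_dependents dependencies reverse_dependencies → Pre_compute_transitive_dependents dependencies reverse_dependencies → Spec_compute_transitive_dependents dependencies reverse_dependencies (compute_transitive_dependents dependencies reverse_dependencies)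

-- ===== LEMMAS AND PROOFS =====

-- y is a key of rev
def pvKeyed (rev : PySem.Dict String (List String)) (y : String) : Prop := (rev.get? y).isSome = true
-- universe of every name occurring in a value list of rev
def pvU (rev : PySem.Dict String (List String)) : List String := (PySem.Dict.values rev).flatten
def pvK (rev : PySem.Dict String (List String)) : Nat := (pvU rev).toFinset.card
-- reachability along rev edges (0 or more steps)
def pvRch (rev : PySem.Dict String (List String)) : String → String → Prop :=
  Relation.ReflTransGen (fun a b => b ∈ pvF rev a)
-- every name mentioned in a value list is itself a key (consequence of Pre_)
def pvEdgeClosed (rev : PySem.Dict String (List String)) : Prop :=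
  ∀ y, ∀ d ∈ pvF rev y, pvKeyed rev d

lemma pvF_subset_U (rev : PySem.Dict String (List String)) (y : String) :
    ∀ d ∈ pvF rev y, d ∈ pvU rev := by
  intro d hd
  unfold pvF at hd
  cases h : rev.get? y with
  | none => rw [h] at hd; simp at hd
  | some l =>
    rw [h] at hd; simp at hd
    have hit : (y, l) ∈ rev.items := PySem.Dict.mem_items_of_get?_eq_some rev h
    have : l ∈ (PySem.Dict.values rev) := by
      simp only [PySem.Dict.values]
      exact List.mem_map.2 ⟨(y, l), hit, rfl⟩
    exact List.mem_flatten.2 ⟨l, this, hd⟩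

lemma pvCard_le (rev : PySem.Dict String (List String)) (v : List String)
    (hn : v.Nodup) (hU : ∀ x ∈ v, x ∈ pvU rev) : v.length ≤ pvK rev := by
  calc v.length = v.toFinset.card := (List.toFinset_card_of_nodup hn).symm
    _ ≤ (pvU rev).toFinset.card := by
        apply Finset.card_le_card
        intro a ha
        rw [List.mem_toFinset] at *
        exact hU a ha
    _ = pvK rev := rfl

lemma pvKeyed_get (rev : PySem.Dict String (List String)) (y : String) (h : pvKeyed rev y) :
    rev.get? y = some (pvF rev y) := by
  unfold pvKeyed at h
  cases hg : rev.get? y with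
  | none => rw [hg] at h; simp at h
  | some l => simp [pvF, hg]

-- completeness from closedness: a set containing start's successors and closed under
-- successors contains every successor of every node reachable from start
lemma pvAcc_mem (rev : PySem.Dict String (List String)) (R : List String) (start : String)
    (h0 : ∀ d ∈ pvF rev start, d ∈ R)
    (hc : ∀ y ∈ R, ∀ d ∈ pvF rev y, d ∈ R) :
    ∀ y, pvRch rev start y → ∀ x ∈ pvF rev y, x ∈ R := by
  intro y h
  induction h with
  | refl => exact h0
  | tail _ hbc ih => exact fun x hx => hc _ (ih _ hbc) x hx

-- the inner 'for dependent in rev[current]' of A appends the same fresh names to visited and queue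
lemma pvBfs_fold (deps : List String) : ∀ (v q : List String), v.Nodup →
    ∃ new, deps.foldl
        (fun (st : PySem.Set String × List String) dependent =>
          if PySem.Set.contains st.1 dependent then st
          else (PySem.Set.add st.1 dependent, st.2 ++ [dependent]))
        (v, q) = (v ++ new, q ++ new)
      ∧ (v ++ new).Nodup ∧ (∀ d ∈ new, d ∈ deps) ∧ (∀ d ∈ deps, d ∈ v ++ new) := by
  induction deps with
  | nil => intro v q hn; exact ⟨[], by simp, by simpa using hn, by simp, by simp⟩
  | cons d ds ih =>
    intro v q hn
    by_cases hd : d ∈ v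
    · obtain ⟨new, h1, h2, h3, h4⟩ := ih v q hn
      refine ⟨new, ?_, h2, fun x hx => .tail _ (h3 x hx), ?_⟩
      · simpa [List.foldl_cons, PySem.Set.contains, hd] using h1
      · intro x hx
        rcases List.mem_cons.1 hx with rfl | hx
        · exact List.mem_append.2 (.inl hd)
        · exact h4 x hx
    · have hn' : (v ++ [d]).Nodup := by
        rw [List.nodup_append]
        exact ⟨hn, List.nodup_singleton d, fun a ha b hb hab => hd ((hab.trans (List.mem_singleton.1 hb)) ▸ ha)⟩
      obtain ⟨new, h1, h2, h3, h4⟩ := ih (v ++ [d]) (q ++ [d]) hn'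
      refine ⟨d :: new, ?_, by simpa using h2, ?_, ?_⟩
      · simpa [List.foldl_cons, PySem.Set.contains, PySem.Set.add, hd] using h1
      · intro x hx
        rcases List.mem_cons.1 hx with rfl | hx
        · exact .head _
        · exact .tail _ (h3 x hx)
      · intro x hx
        rcases List.mem_cons.1 hx with rfl | hx
        · simp
        · have := h4 x hx; simpa using this

-- main BFS invariant lemma: with enough fuel the loop of A returns a duplicate-free list
-- that contains its input, is closed under successors, and consists exactly of the
-- successors of nodes reachable from the queue
lemma pvBfs_main (rev : PySem.Dict String (List String)) (hE : pvEdgeClosed rev) :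
    ∀ (fuel : Nat) (q v : List String),
    v.Nodup → (∀ x ∈ v, x ∈ pvU rev) → (∀ x ∈ q, pvKeyed rev x) →
    (∀ y ∈ v, (∀ d ∈ pvF rev y, d ∈ v) ∨ y ∈ q) →
    q.length + 2 * (pvK rev - v.length) ≤ fuel →
    (∀ x ∈ v, x ∈ pvBfsA rev fuel q v) ∧
    (pvBfsA rev fuel q v).Nodup ∧
    (∀ x ∈ pvBfsA rev fuel q v, x ∈ v ∨ x ∈ pvU rev) ∧
    (∀ y ∈ pvBfsA rev fuel q v, ∀ d ∈ pvF rev y, d ∈ pvBfsA rev fuel q v) ∧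
    (∀ x ∈ pvBfsA rev fuel q v, x ∈ v ∨ ∃ s ∈ q, ∃ y, pvRch rev s y ∧ x ∈ pvF rev y) ∧
    (∀ s ∈ q, ∀ d ∈ pvF rev s, d ∈ pvBfsA rev fuel q v) := by
  intro fuel
  induction fuel with
  | zero =>
    intro q v hn hU hq hgood hfuel
    cases q with
    | nil =>
      have hr : pvBfsA rev 0 [] v = v := by simp [pvBfsA]
      rw [hr]
      refine ⟨fun x hx => hx, hn, fun x hx => .inl hx, ?_, fun x hx => .inl hx, by simp⟩
      intro y hy d hd
      rcases hgood y hy with h | h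
      · exact h d hd
      · simp at h
    | cons c qt => rw [List.length_cons] at hfuel; omega
  | succ fuel ih =>
    intro q v hn hU hq hgood hfuel
    cases q with
    | nil =>
      have hr : pvBfsA rev (fuel + 1) [] v = v := by simp [pvBfsA]
      rw [hr]
      refine ⟨fun x hx => hx, hn, fun x hx => .inl hx, ?_, fun x hx => .inl hx, by simp⟩
      intro y hy d hd
      rcases hgood y hy with h | h
      · exact h d hd
      · simp at h
    | cons c qt =>
      have hkc : pvKeyed rev c := hq c (.head _)
      have hgc := pvKeyed_get rev c hkc
      obtain ⟨new, hfold, hnn, hnew_sub, hall⟩ := pvBfs_fold (pvF rev c) v qt hn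
      have hred : pvBfsA rev (fuel + 1) (c :: qt) v = pvBfsA rev fuel (qt ++ new) (v ++ new) := by
        simp only [pvBfsA, hgc]
        rw [hfold]
      have hnewU : ∀ x ∈ new, x ∈ pvU rev := fun x hx => pvF_subset_U rev c x (hnew_sub x hx)
      have hvU' : ∀ x ∈ v ++ new, x ∈ pvU rev := by
        intro x hx
        rcases List.mem_append.1 hx with hx | hx
        · exact hU x hx
        · exact hnewU x hx
      have hq' : ∀ x ∈ qt ++ new, pvKeyed rev x := by
        intro x hx
        rcases List.mem_append.1 hx with hx | hx
        · exact hq x (.tail _ hx)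
        · exact hE c x (hnew_sub x hx)
      have hgood' : ∀ y ∈ v ++ new, (∀ d ∈ pvF rev y, d ∈ v ++ new) ∨ y ∈ qt ++ new := by
        intro y hy
        rcases List.mem_append.1 hy with hy | hy
        · rcases hgood y hy with h | h
          · exact .inl fun d hd => List.mem_append.2 (.inl (h d hd))
          · rcases List.mem_cons.1 h with rfl | h
            · exact .inl hall
            · exact .inr (List.mem_append.2 (.inl h))
        · exact .inr (List.mem_append.2 (.inr hy))
      have hcard : (v ++ new).length ≤ pvK rev := pvCard_le rev (v ++ new) hnn hvU'
      have hfuel' : (qt ++ new).length + 2 * (pvK rev - (v ++ new).length) ≤ fuel := by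
        rw [List.length_append] at hcard ⊢
        rw [List.length_cons] at hfuel
        rw [List.length_append]
        omega
      obtain ⟨C1, C2, C3, C4, C5, C6⟩ := ih (qt ++ new) (v ++ new) hnn hvU' hq' hgood' hfuel'
      rw [hred]
      refine ⟨fun x hx => C1 x (List.mem_append.2 (.inl hx)), C2, ?_, C4, ?_, ?_⟩
      · intro x hx
        rcases C3 x hx with h | h
        · rcases List.mem_append.1 h with h | h
          · exact .inl h
          · exact .inr (hnewU x h)
        · exact .inr h
      · intro x hx
        rcases C5 x hx with h | ⟨s, hs, y, hy1, hy2⟩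
        · rcases List.mem_append.1 h with h | h
          · exact .inl h
          · exact .inr ⟨c, .head _, c, .refl, hnew_sub x h⟩
        · rcases List.mem_append.1 hs with hs | hs
          · exact .inr ⟨s, .tail _ hs, y, hy1, hy2⟩
          · exact .inr ⟨c, .head _, y,
              (Relation.ReflTransGen.single (hnew_sub s hs)).trans hy1, hy2⟩
      · intro s hs d hd
        rcases List.mem_cons.1 hs with rfl | hs
        · exact C1 d (hall d hd)
        · exact C6 s (List.mem_append.2 (.inl hs)) d hd

-- membership in the set comprehension of B
lemma pvSucc_spec (rev : PySem.Dict String (List String)) :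
    ∀ (frontier : List String) (s : PySem.Set String), s.Nodup →
    ((frontier.foldl (fun s v => PySem.Set.update s (pvF rev v)) s).Nodup ∧
     ∀ x, x ∈ frontier.foldl (fun s v => PySem.Set.update s (pvF rev v)) s ↔
       x ∈ s ∨ ∃ v ∈ frontier, x ∈ pvF rev v) := by
  intro frontier
  induction frontier with
  | nil => intro s hn; exact ⟨hn, by simp⟩
  | cons c cs ih =>
    intro s hn
    obtain ⟨h1, h2⟩ := ih (PySem.Set.update s (pvF rev c)) (PySem.Set.nodup_update s (pvF rev c) hn)
    refine ⟨h1, ?_⟩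
    intro x
    rw [List.foldl_cons, h2 x, PySem.Set.mem_update]
    constructor
    · rintro ((h | h) | ⟨v, hv, hx⟩)
      · exact .inl h
      · exact .inr ⟨c, .head _, h⟩
      · exact .inr ⟨v, .tail _ hv, hx⟩
    · rintro (h | ⟨v, hv, hx⟩)
      · exact .inl (.inl h)
      · rcases List.mem_cons.1 hv with rfl | hv
        · exact .inl (.inr hx)
        · exact .inr ⟨v, hv, hx⟩

-- main saturation invariant for B: with enough fuel the loop returns a duplicate-free
-- superset of visited that is closed under successors, every element satisfying any
-- successor-closed predicate P that holds on visited
lemma pvSat_main (rev : PySem.Dict String (List String)) (P : String → Prop)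
    (hP : ∀ v, P v → ∀ d ∈ pvF rev v, P d) :
    ∀ (fuel : Nat) (visited frontier : List String),
    visited.Nodup → (∀ x ∈ visited, x ∈ pvU rev) → (∀ x ∈ visited, P x) →
    (∀ x ∈ frontier, x ∈ visited) →
    (∀ y ∈ visited, (∀ d ∈ pvF rev y, d ∈ visited) ∨ y ∈ frontier) →
    (frontier ≠ [] → 2 + (pvK rev - visited.length) ≤ fuel) →
    (∀ x ∈ visited, x ∈ pvSatB rev fuel visited frontier) ∧
    (pvSatB rev fuel visited frontier).Nodup ∧
    (∀ y ∈ pvSatB rev fuel visited frontier, ∀ d ∈ pvF rev y, d ∈ pvSatB rev fuel visited frontier) ∧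
    (∀ x ∈ pvSatB rev fuel visited frontier, P x) := by
  intro fuel
  induction fuel with
  | zero =>
    intro visited frontier hn hU hPv hfv hgood hfuel
    have hfe : frontier = [] := by
      by_contra h
      have := hfuel h
      omega
    subst hfe
    have hr : pvSatB rev 0 visited [] = visited := by simp [pvSatB]
    rw [hr]
    refine ⟨fun x hx => hx, hn, ?_, hPv⟩
    intro y hy d hd
    rcases hgood y hy with h | h
    · exact h d hd
    · simp at h
  | succ fuel ih =>
    intro visited frontier hn hU hPv hfv hgood hfuel
    by_cases hfe : frontier = []
    · subst hfe
      have hr : pvSatB rev (fuel + 1) visited [] = visited := by simp [pvSatB]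
      rw [hr]
      refine ⟨fun x hx => hx, hn, ?_, hPv⟩
      intro y hy d hd
      rcases hgood y hy with h | h
      · exact h d hd
      · simp at h
    · obtain ⟨hsn, hsm⟩ := pvSucc_spec rev frontier PySem.Set.empty (by simp [PySem.Set.empty])
      have hsm' : ∀ x, x ∈ pvSucc rev frontier ↔ ∃ v ∈ frontier, x ∈ pvF rev v := by
        intro x
        rw [pvSucc, hsm x]
        simp [PySem.Set.empty]
      set f' := PySem.Set.diff (pvSucc rev frontier) visited with hf'
      have hmf' : ∀ x, x ∈ f' ↔ (∃ v ∈ frontier, x ∈ pvF rev v) ∧ x ∉ visited := by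
        intro x
        rw [hf', PySem.Set.mem_diff, hsm' x]
      have hnf' : f'.Nodup := PySem.Set.nodup_diff (pvSucc rev frontier) visited hsn
      have hdisj : ∀ x ∈ f', x ∉ visited := fun x hx => ((hmf' x).1 hx).2
      have huni : PySem.Set.union visited f' = visited ++ f' :=
        PySem.Set.update_eq_append_of_disjoint visited f' hnf' hdisj
      have hred : pvSatB rev (fuel + 1) visited frontier = pvSatB rev fuel (visited ++ f') f' := by
        rw [pvSatB, if_neg hfe]
        show pvSatB rev fuel (PySem.Set.union visited f') f' = _
        rw [huni]
      have hn' : (visited ++ f').Nodup := by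
        rw [List.nodup_append]
        exact ⟨hn, hnf', fun a ha b hb hab => hdisj b hb (hab ▸ ha)⟩
      have hU' : ∀ x ∈ visited ++ f', x ∈ pvU rev := by
        intro x hx
        rcases List.mem_append.1 hx with hx | hx
        · exact hU x hx
        · obtain ⟨⟨v, _, hxv⟩, _⟩ := (hmf' x).1 hx
          exact pvF_subset_U rev v x hxv
      have hPv' : ∀ x ∈ visited ++ f', P x := by
        intro x hx
        rcases List.mem_append.1 hx with hx | hx
        · exact hPv x hx
        · obtain ⟨⟨v, hv, hxv⟩, _⟩ := (hmf' x).1 hx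
          exact hP v (hPv v (hfv v hv)) x hxv
      have hgood' : ∀ y ∈ visited ++ f', (∀ d ∈ pvF rev y, d ∈ visited ++ f') ∨ y ∈ f' := by
        intro y hy
        rcases List.mem_append.1 hy with hy | hy
        · rcases hgood y hy with h | h
          · exact .inl fun d hd => List.mem_append.2 (.inl (h d hd))
          · refine .inl fun d hd => ?_
            by_cases hdv : d ∈ visited
            · exact List.mem_append.2 (.inl hdv)
            · exact List.mem_append.2 (.inr ((hmf' d).2 ⟨⟨y, h, hd⟩, hdv⟩))
        · exact .inr hy
      have hfuel' : f' ≠ [] → 2 + (pvK rev - (visited ++ f').length) ≤ fuel := by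
        intro hne
        have hcard : (visited ++ f').length ≤ pvK rev := pvCard_le rev _ hn' hU'
        have hlen : 1 ≤ f'.length := List.length_pos_iff.2 hne
        have := hfuel hfe
        rw [List.length_append] at hcard ⊢
        omega
      obtain ⟨C1, C2, C3, C4⟩ := ih (visited ++ f') f' hn' hU' hPv' (fun x hx => List.mem_append.2 (.inr hx)) hgood' hfuel'
      rw [hred]
      exact ⟨fun x hx => C1 x (List.mem_append.2 (.inl hx)), C2, C3, C4⟩

-- per-start agreement: A's BFS visited set and B's saturated set have the same length
lemma pvLen_eq (rev : PySem.Dict String (List String)) (hE : pvEdgeClosed rev) (start : String) :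
    (pvBfsA rev (2 + 2 * (pvU rev).length) [start] []).length
      = (pvSatB rev (2 + (pvU rev).length)
          (PySem.Set.ofList (pvF rev start)) (PySem.Set.ofList (pvF rev start))).length := by
  have hκ : pvK rev ≤ (pvU rev).length := List.toFinset_card_le _
  by_cases hk : pvKeyed rev start
  · obtain ⟨B1, B2, B3, B4, B5, B6⟩ :=
      pvBfs_main rev hE (2 + 2 * (pvU rev).length) [start] [] (by simp) (by simp)
        (by intro x hx; rw [List.mem_singleton.1 hx]; exact hk) (by simp)
        (by rw [List.length_singleton, List.length_nil]; omega)
    have hv0n : (PySem.Set.ofList (pvF rev start)).Nodup := PySem.Set.nodup_ofList _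
    have hv0m : ∀ x, x ∈ PySem.Set.ofList (pvF rev start) ↔ x ∈ pvF rev start :=
      fun x => PySem.Set.mem_ofList _ x
    obtain ⟨D1, D2, D3, D4⟩ :=
      pvSat_main rev (fun x => ∃ y, pvRch rev start y ∧ x ∈ pvF rev y)
        (by
          rintro v ⟨y, hy, hvy⟩ d hd
          exact ⟨v, hy.tail hvy, hd⟩)
        (2 + (pvU rev).length)
        (PySem.Set.ofList (pvF rev start)) (PySem.Set.ofList (pvF rev start))
        hv0n
        (fun x hx => pvF_subset_U rev start x ((hv0m x).1 hx))
        (fun x hx => ⟨start, .refl, (hv0m x).1 hx⟩)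
        (fun x hx => hx)
        (fun y hy => .inr hy)
        (fun _ => by
          have : pvK rev - (PySem.Set.ofList (pvF rev start)).length ≤ pvK rev := Nat.sub_le _ _
          omega)
    have hmem : ∀ x, x ∈ pvBfsA rev (2 + 2 * (pvU rev).length) [start] []
        ↔ x ∈ pvSatB rev (2 + (pvU rev).length)
            (PySem.Set.ofList (pvF rev start)) (PySem.Set.ofList (pvF rev start)) := by
      intro x
      constructor
      · intro hx
        rcases B5 x hx with h | ⟨s, hs, y, hy1, hy2⟩
        · simp at h
        · rw [List.mem_singleton.1 hs] at hy1
          exact pvAcc_mem rev _ start (fun d hd => D1 d ((hv0m d).2 hd)) D3 y hy1 x hy2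
      · intro hx
        obtain ⟨y, hy1, hy2⟩ := D4 x hx
        exact pvAcc_mem rev _ start (B6 start (List.mem_singleton.2 rfl)) B4 y hy1 x hy2
    exact ((List.perm_ext_iff_of_nodup B2 D2).2 hmem).length_eq
  · have hg : rev.get? start = none := by
      cases h : rev.get? start with
      | none => rfl
      | some l => exact absurd (by simp [pvKeyed, h]) hk
    have e1 : 2 + 2 * (pvU rev).length = (1 + 2 * (pvU rev).length) + 1 := by omega
    have e2 : 2 + (pvU rev).length = (1 + (pvU rev).length) + 1 := by omega
    rw [e1, e2]
    simp [pvBfsA, pvSatB, pvF, hg, PySem.Set.ofList]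

-- congruence for the identical outer 'for package in all_packages' dict-building loop
lemma pvFoldl_insert_congr (P : List String) (f g : String → Int) (h : ∀ p, f p = g p) :
    ∀ d : PySem.Dict String Int,
    P.foldl (fun d package => d.insert package (f package)) d
      = P.foldl (fun d package => d.insert package (g package)) d := by
  induction P with
  | nil => intro d; rfl
  | cons p ps ih => intro d; simp only [List.foldl_cons, h p, ih]

-- ===== VERDICT (by name: the statement is the Claim_ definition above) =====
theorem compute_transitive_dependents_spec : Claim_equal_compute_transitive_dependents := by
  intro dependencies reverse_dependencies _ hpre
  unfold Spec_compute_transitive_dependents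
  have hE : pvEdgeClosed (PySem.Dict.mk reverse_dependencies) := by
    intro y d hd
    unfold pvF at hd
    cases hg : (PySem.Dict.mk reverse_dependencies).get? y with
    | none => rw [hg] at hd; simp at hd
    | some l =>
      rw [hg] at hd; simp at hd
      have hit : (y, l) ∈ (PySem.Dict.mk reverse_dependencies).items :=
        PySem.Dict.mem_items_of_get?_eq_some _ hg
      have hcon := hpre.2 (y, l) hit d hd
      unfold pvKeyed
      rw [← PySem.Dict.contains_eq_isSome_get?]
      exact hcon
  have hlen : ∀ p : String,
      ((PySem.Set.len (pvBfsA (PySem.Dict.mk reverse_dependencies)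
          (2 + 2 * (PySem.Dict.values (PySem.Dict.mk reverse_dependencies)).flatten.length)
          [p] PySem.Set.empty) : Int) - 1)
        = ((PySem.Set.len (pvSatB (PySem.Dict.mk reverse_dependencies)
          (2 + (PySem.Dict.values (PySem.Dict.mk reverse_dependencies)).flatten.length)
          (PySem.Set.ofList (pvF (PySem.Dict.mk reverse_dependencies) p))
          (PySem.Set.ofList (pvF (PySem.Dict.mk reverse_dependencies) p))) : Int) - 1) := by
    intro p
    have h := pvLen_eq (PySem.Dict.mk reverse_dependencies) hE p
    simp only [PySem.Set.len, PySem.Set.empty, pvU] at h ⊢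
    rw [h]
  simp only [compute_transitive_dependents, compute_transitive_dependents_alt]
  exact congrArg PySem.Dict.items
    (pvFoldl_insert_congr _ _ _ hlen PySem.Dict.empty)
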